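-- pv_equiv track=rewrite | github.com/yoonwoo123/Algorithm | 201227프로/삼각달팽이.py | solution
-- ===== SOURCE A (Python) =====
-- def solution(n):
--     answer = []
--     dx = (1, 0, -1)
--     dy = (0, 1, -1)
--     triangle = [[0 for _ in range(x)] for x in range(1, n+1)]
--
--     number, dir, count = 1, 0, 0
--     x, y = 0, 0
--     triangle[x][y] = number
--
--     while count < 2:
--         nx, ny = x + dx[dir], y + dy[dir]
--         if nx >= n or nx < 0 or ny >= n or ny < 0 or triangle[nx][ny]:
--             dir = (dir + 1) % 3
--             count += 1
--         else:
--             number += 1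
--             triangle[nx][ny] = number
--             x, y = nx, ny
--             count = 0
--
--     for row in triangle:
--         answer.extend(row)
--
--     return answer
-- ===== SOURCE B (Python) =====
-- def solution(n):
--     # Leg-schedule spiral: move lengths are n-1 (down), then n-1, n-2, ..., 1
--     # with directions cycling down / right / up-left; no collision probing.
--     triangle = [[0] * k for k in range(1, n + 1)]
--     triangle[0][0] = 1
--     x = y = 0
--     num = 2
--     moves = [n - 1] + list(range(n - 1, 0, -1))
--     steps = ((1, 0), (0, 1), (-1, -1))
--     for i, L in enumerate(moves):
--         dx, dy = steps[i % 3]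
--         for _ in range(L):
--             x += dx
--             y += dy
--             triangle[x][y] = num
--             num += 1
--     return [v for row in triangle for v in row]
-- ===== Notes on version B (the rewrite author's own statement) =====
-- stated objective: alternative
-- what changed: B replaces A's collision/bounds-probing turn logic (sentinel test on each step) by a precomputed leg-length schedule n-1, n-1, n-2, ..., 1 with directions cycling down/right/up-left, assigning consecutive numbers along each leg with no probing.
import Mathlib
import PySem

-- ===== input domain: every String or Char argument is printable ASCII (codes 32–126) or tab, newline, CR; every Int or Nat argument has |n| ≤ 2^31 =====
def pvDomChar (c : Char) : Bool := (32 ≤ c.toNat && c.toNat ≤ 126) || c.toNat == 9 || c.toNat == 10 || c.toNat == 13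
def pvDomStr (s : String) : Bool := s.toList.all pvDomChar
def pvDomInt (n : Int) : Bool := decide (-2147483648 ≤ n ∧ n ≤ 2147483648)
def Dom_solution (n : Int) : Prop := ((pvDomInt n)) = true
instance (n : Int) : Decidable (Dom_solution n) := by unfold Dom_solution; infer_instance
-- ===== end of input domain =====

-- B replaces A's per-step collision/bounds probing by a precomputed leg-length
-- schedule (n-1, n-1, n-2, ..., 1, directions cycling down/right/up-left); same
-- return value on every n ≥ 1 (both raise IndexError for n ≤ 0).

-- shared helpers: triangle[i][j] read / write (Python list indexing semantics)
def getCell (t : List (List Int)) (i j : Int) : Int :=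
  PySem.List.pyGetD (PySem.List.pyGetD t i []) j 0

def setCell (t : List (List Int)) (i j v : Int) : List (List Int) :=
  PySem.List.pySetD t i (PySem.List.pySetD (PySem.List.pyGetD t i []) j v)

-- ===== PORT A =====
def dxA (d : Int) : Int := if d = 0 then 1 else if d = 1 then 0 else -1
def dyA (d : Int) : Int := if d = 0 then 0 else if d = 1 then 1 else -1

-- the while loop of A (fuel makes the recursion structural; fuel is ample, see proofs)
def loopA (n : Int) : Nat → List (List Int) → Int → Int → Int → Int → Int → List (List Int)
  | 0, tri, _, _, _, _, _ => tri
  | fuel+1, tri, x, y, dir, count, number =>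
    if count < 2 then
      if x + dxA dir ≥ n ∨ x + dxA dir < 0 ∨ y + dyA dir ≥ n ∨ y + dyA dir < 0 ∨
         getCell tri (x + dxA dir) (y + dyA dir) ≠ 0 then
        loopA n fuel tri x y ((dir + 1) % 3) (count + 1) number
      else
        loopA n fuel (setCell tri (x + dxA dir) (y + dyA dir) (number + 1))
          (x + dxA dir) (y + dyA dir) dir 0 (number + 1)
    else tri

def solution (n : Int) : List Int :=
  let triangle := (PySem.List.pyRange 1 (n+1) 1).map
    (fun x => (PySem.List.pyRange 0 x 1).map (fun _ => (0 : Int)))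
  let triangle := setCell triangle 0 0 1
  let tri := loopA n (n.toNat * n.toNat + 12) triangle 0 0 0 0 1
  tri.foldl (fun acc row => acc ++ row) []

-- ===== PORT B =====
def stepsB (i : Int) : Int × Int := if i = 0 then (1, 0) else if i = 1 then (0, 1) else (-1, -1)

def stepB (dxy : Int × Int) (st : List (List Int) × Int × Int × Int) :
    List (List Int) × Int × Int × Int :=
  (setCell st.1 (st.2.1 + dxy.1) (st.2.2.1 + dxy.2) st.2.2.2,
   st.2.1 + dxy.1, st.2.2.1 + dxy.2, st.2.2.2 + 1)

-- the doubly-nested for loop of B: one fold over the enumerated move list,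
-- the inner `for _ in range(L)` as a fold over range(L)
def legsB (ps : List (Int × Int)) (st : List (List Int) × Int × Int × Int) :
    List (List Int) × Int × Int × Int :=
  ps.foldl (fun st p =>
    (PySem.List.pyRange 0 p.2 1).foldl (fun st _ => stepB (stepsB (p.1 % 3)) st) st) st

def solution_alt (n : Int) : List Int :=
  let triangle := (PySem.List.pyRange 1 (n+1) 1).map (fun k => List.replicate k.toNat (0 : Int))
  let triangle := setCell triangle 0 0 1
  let moves : List Int := [n - 1] ++ PySem.List.pyRange (n-1) 0 (-1)
  let st := legsB (PySem.List.enumerate moves 0) (triangle, 0, 0, 2)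
  (st.1.map (fun row => row)).flatten

-- ===== PRECONDITION & SPEC =====
-- Pre_ excludes exactly n ≤ 0, where A (and B) raise IndexError on triangle[0][0].
def Pre_solution (n : Int) : Prop := 1 ≤ n
instance (n : Int) : Decidable (Pre_solution n) := by unfold Pre_solution; infer_instance
def pvWitness_solution : Int := (4)

def Spec_solution (n : Int) (out : List Int) : Prop := out = solution_alt n
instance (n : Int) (out : List Int) : Decidable (Spec_solution n out) := by unfold Spec_solution; infer_instance

-- ===== CLAIM (what is proved, stated in full; the proofs are below) =====
def Claim_equal_solution : Prop := ∀ (n : Int), Dom_solution n → Pre_solution n → Spec_solution n (solution n)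

-- ===== LEMMAS AND PROOFS =====

-- triangular numbers
def Tn : Nat → Nat
  | 0 => 0
  | k+1 => Tn k + (k+1)

def T (x : Int) : Int := (Tn x.toNat : Int)

theorem T_nonneg (x : Int) : 0 ≤ T x := by unfold T; positivity

theorem Tn_succ (k : Nat) : Tn (k + 1) = Tn k + (k + 1) := rfl

theorem T_succ (x : Int) (h : 0 ≤ x) : T (x + 1) = T x + (x + 1) := by
  unfold T
  have h1 : (x + 1).toNat = x.toNat + 1 := by omega
  rw [h1, Tn_succ]
  push_cast
  omega

theorem Tn_mono {a b : Nat} (h : a ≤ b) : Tn a ≤ Tn b := by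
  induction b with
  | zero => simp_all
  | succ k ih =>
    rcases Nat.le_succ_iff.mp h with h' | h'
    · exact le_trans (ih h') (by rw [Tn_succ]; omega)
    · subst h'; exact Nat.le_refl _

theorem T_mono {a b : Int} (ha : 0 ≤ a) (h : a ≤ b) : T a ≤ T b := by
  unfold T
  exact_mod_cast Tn_mono (by omega)

theorem T_delta {s : Int} (h : 3 ≤ s) : T s = T (s - 3) + 3*s - 3 := by
  have h1 := T_succ (s-3) (by omega); rw [show s-3+1 = s-2 by ring] at h1
  have h2 := T_succ (s-2) (by omega); rw [show s-2+1 = s-1 by ring] at h2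
  have h3 := T_succ (s-1) (by omega); rw [show s-1+1 = s by ring] at h3
  omega

-- the closed-form spiral index of cell (i, j): 1-based order of visit
def idx (n i j : Int) : Int :=
  let r := min j (min (n-1-i) (i-j))
  let s := n - 3*r
  T n - T s + (if j = r then i - 2*r + 1
               else if i = n-1-r then s + (j - r)
               else 2*s - 1 + (n-1-r-i))

theorem idx_down {n r i : Int} (h0 : 0 ≤ r) (h1 : 2*r ≤ i) (h2 : i ≤ n-1-r) :
    idx n i r = T n - T (n-3*r) + (i - 2*r) + 1 := by
  simp only [idx]
  rw [show min r (min (n-1-i) (i-r)) = r by omega, if_pos rfl]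
  omega

theorem idx_right {n r j : Int} (h0 : 0 ≤ r) (hj : r < j) (hj2 : j ≤ n-1-2*r) :
    idx n (n-1-r) j = T n - T (n-3*r) + (n-3*r) + (j - r) := by
  simp only [idx]
  rw [show min j (min (n-1-(n-1-r)) (n-1-r-j)) = r by omega,
      if_neg (by omega), if_pos rfl]
  omega

theorem idx_up {n r i j : Int} (h0 : 0 ≤ r) (hj : r < j) (hi : i = j + r) (hi2 : i ≤ n-2-r) :
    idx n i j = T n - T (n-3*r) + 2*(n-3*r) - 1 + (n-1-r-i) := by
  simp only [idx]
  rw [show min j (min (n-1-i) (i-j)) = r by omega,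
      if_neg (by omega), if_neg (by omega)]
  omega

-- three-way leg classification of a valid cell
theorem idx_cases {n i j r : Int} (hj : 0 ≤ j) (hij : j ≤ i) (hin : i < n)
    (hr : r = min j (min (n-1-i) (i-j))) :
    0 ≤ r ∧ 1 ≤ n - 3*r ∧
    ( (j = r ∧ 2*r ≤ i ∧ i ≤ n-1-r ∧ idx n i j = T n - T (n-3*r) + (i-2*r) + 1)
    ∨ (r < j ∧ i = n-1-r ∧ j ≤ n-1-2*r ∧ 2 ≤ n-3*r ∧
        idx n i j = T n - T (n-3*r) + (n-3*r) + (j-r))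
    ∨ (r < j ∧ i = j + r ∧ 2*r+1 ≤ i ∧ i ≤ n-2-r ∧ 3 ≤ n-3*r ∧
        idx n i j = T n - T (n-3*r) + 2*(n-3*r) - 1 + (n-1-r-i))) := by
  have hb : 0 ≤ r ∧ r ≤ j ∧ r ≤ n-1-i ∧ r ≤ i-j ∧ (r = j ∨ r = n-1-i ∨ r = i-j) := by omega
  refine ⟨by omega, by omega, ?_⟩
  by_cases h1 : j = r
  · left
    refine ⟨h1, by omega, by omega, ?_⟩
    have := idx_down (n := n) (r := r) (i := i) (by omega) (by omega) (by omega)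
    rw [h1]; omega
  · by_cases h2 : i = n-1-r
    · right; left
      refine ⟨by omega, h2, by omega, by omega, ?_⟩
      have := idx_right (n := n) (r := r) (j := j) (by omega) (by omega) (by omega)
      rw [h2]; omega
    · right; right
      have h3 : i - j = r := by omega
      refine ⟨by omega, by omega, by omega, by omega, by omega, ?_⟩
      have := idx_up (n := n) (r := r) (i := i) (j := j) (by omega) (by omega) (by omega) (by omega)
      omega

theorem idx_pos {n i j : Int} (hj : 0 ≤ j) (hij : j ≤ i) (hin : i < n) : 1 ≤ idx n i j := by
  obtain ⟨h0, h1, hc⟩ := idx_cases hj hij hin (r := min j (min (n-1-i) (i-j))) rfl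
  set r := min j (min (n-1-i) (i-j)) with hr
  have hm := T_mono (a := n - 3*r) (b := n) (by omega) (by omega)
  rcases hc with ⟨_,_,_,h⟩ | ⟨_,_,_,_,h⟩ | ⟨_,_,_,_,_,h⟩ <;> omega

-- cells in an outer ring have strictly smaller indices
theorem idx_ring_lt {n i j i' j' : Int} (hj : 0 ≤ j) (hij : j ≤ i) (hin : i < n)
    (hj' : 0 ≤ j') (hij' : j' ≤ i') (hin' : i' < n)
    (hrr : min j (min (n-1-i) (i-j)) < min j' (min (n-1-i') (i'-j'))) :
    idx n i j < idx n i' j' := by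
  obtain ⟨h0, h1, hc⟩ := idx_cases hj hij hin (r := min j (min (n-1-i) (i-j))) rfl
  obtain ⟨h0', h1', hc'⟩ := idx_cases hj' hij' hin' (r := min j' (min (n-1-i') (i'-j'))) rfl
  set r := min j (min (n-1-i) (i-j)) with hr
  set r' := min j' (min (n-1-i') (i'-j')) with hr'
  set s := n - 3*r with hs
  set s' := n - 3*r' with hs'
  have hss : s' ≤ s - 3 := by omega
  have hd := T_delta (s := s) (by omega)
  have hm := T_mono (a := s') (b := s - 3) (by omega) hss
  have hn1 := T_nonneg (s-3)
  have hub : idx n i j ≤ T n - T s + (3*s - 3) := by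
    rcases hc with ⟨_,_,_,h⟩ | ⟨_,_,_,h2,h⟩ | ⟨_,_,_,_,h3,h⟩ <;> omega
  have hlb : T n - T s' + 1 ≤ idx n i' j' := by
    rcases hc' with ⟨_,_,_,h⟩ | ⟨_,_,_,_,h⟩ | ⟨_,_,_,_,_,h⟩ <;> omega
  omega

theorem idx_inj {n i j i' j' : Int} (hj : 0 ≤ j) (hij : j ≤ i) (hin : i < n)
    (hj' : 0 ≤ j') (hij' : j' ≤ i') (hin' : i' < n) (h : idx n i j = idx n i' j') :
    i = i' ∧ j = j' := by
  obtain ⟨h0, h1, hc⟩ := idx_cases hj hij hin (r := min j (min (n-1-i) (i-j))) rfl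
  obtain ⟨h0', h1', hc'⟩ := idx_cases hj' hij' hin' (r := min j' (min (n-1-i') (i'-j'))) rfl
  set r := min j (min (n-1-i) (i-j)) with hr
  set r' := min j' (min (n-1-i') (i'-j')) with hr'
  have hrr : r = r' := by
    rcases lt_trichotomy r r' with hlt | heq | hgt
    · exact absurd h (by have := idx_ring_lt hj hij hin hj' hij' hin' hlt; omega)
    · exact heq
    · exact absurd h (by have := idx_ring_lt hj' hij' hin' hj hij hin hgt; omega)
  rw [← hrr] at hc'
  set s := n - 3*r with hs
  rcases hc with ⟨a1,a2,a3,ha⟩ | ⟨a1,a2,a3,a4,ha⟩ | ⟨a1,a2,a3,a4,a5,ha⟩ <;>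
    rcases hc' with ⟨b1,b2,b3,hb⟩ | ⟨b1,b2,b3,b4,hb⟩ | ⟨b1,b2,b3,b4,b5,hb⟩ <;>
      constructor <;> omega

-- the triangle after the first m numbers have been placed
def cellVal (n m i j : Int) : Int := if idx n i j ≤ m then idx n i j else 0

def mkTri (n m : Int) : List (List Int) :=
  (List.range n.toNat).map
    (fun (i : Nat) => (List.range (i+1)).map (fun (j : Nat) => cellVal n m (i : Int) (j : Int)))

theorem length_mkTri (n m : Int) : (mkTri n m).length = n.toNat := by
  simp [mkTri]

theorem getElem_mkTri {n m : Int} {k : Nat} (h : k < (mkTri n m).length) :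
    (mkTri n m)[k] = (List.range (k+1)).map (fun (j : Nat) => cellVal n m ((k : Nat) : Int) (j : Int)) := by
  simp [mkTri]

theorem getCell_mkTri {n m i j : Int} (hj : 0 ≤ j) (hij : j ≤ i) (hin : i < n) :
    getCell (mkTri n m) i j = cellVal n m i j := by
  have hi0 : 0 ≤ i := le_trans hj hij
  have h1 : i < ((mkTri n m).length : Int) := by rw [length_mkTri]; omega
  rw [getCell, PySem.List.pyGetD_eq_getElem _ _ hi0 h1, getElem_mkTri]
  have h2 : j < (((List.range (i.toNat+1)).map
      (fun (l : Nat) => cellVal n m ((i.toNat : Nat) : Int) (l : Int))).length : Int) := by simp; omega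
  rw [PySem.List.pyGetD_eq_getElem _ _ hj h2]
  rw [List.getElem_map, List.getElem_range]
  congr 1 <;> omega

theorem cellVal_eq_of_ne {n m x y i j : Int} (hy : 0 ≤ y) (hxy : y ≤ x) (hxn : x < n)
    (hj : 0 ≤ j) (hij : j ≤ i) (hin : i < n) (hidx : idx n x y = m + 1)
    (hne : ¬(i = x ∧ j = y)) : cellVal n m i j = cellVal n (m+1) i j := by
  have hni : idx n i j ≠ m + 1 := by
    intro h
    exact hne (by
      obtain ⟨e1, e2⟩ := idx_inj hj hij hin hy hxy hxn (h.trans hidx.symm)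
      exact ⟨e1, e2⟩)
  unfold cellVal
  split_ifs <;> omega

theorem setCell_mkTri {n m x y : Int} (hy : 0 ≤ y) (hxy : y ≤ x) (hxn : x < n)
    (hidx : idx n x y = m + 1) :
    setCell (mkTri n m) x y (m + 1) = mkTri n (m + 1) := by
  have hx0 : 0 ≤ x := le_trans hy hxy
  have hxl : x < ((mkTri n m).length : Int) := by rw [length_mkTri]; omega
  have hxl' : x.toNat < (mkTri n m).length := by rw [length_mkTri]; omega
  rw [setCell, PySem.List.pyGetD_eq_getElem _ _ hx0 hxl,
      PySem.List.pySetD_of_nonneg _ _ hy, PySem.List.pySetD_of_nonneg _ _ hx0,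
      getElem_mkTri hxl']
  apply List.ext_getElem
  · simp [length_mkTri]
  · intro k h1 h2
    rw [getElem_mkTri h2, List.getElem_set]
    by_cases hk : x.toNat = k
    · subst hk
      rw [if_pos rfl]
      have hkn : ((x.toNat : Nat) : Int) = x := by omega
      apply List.ext_getElem
      · simp
      · intro l hl1 hl2
        simp only [List.length_map, List.length_range] at hl2
        rw [List.getElem_set, List.getElem_map, List.getElem_range]
        by_cases hlv : y.toNat = l
        · subst hlv
          rw [if_pos rfl, List.getElem_map, List.getElem_range]
          unfold cellVal
          simp only [hkn, show ((y.toNat : Nat) : Int) = y by omega]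
          rw [hidx, if_pos (by omega)]
        · rw [if_neg hlv, List.getElem_map, List.getElem_range]
          simp only [hkn]
          exact cellVal_eq_of_ne hy hxy hxn (by omega) (by omega) hxn hidx
            (by intro he; exact hlv (by omega))
    · rw [if_neg hk]
      have h1' : k < (mkTri n m).length := by simpa using h1
      rw [getElem_mkTri h1']
      have hkn : (k : Int) < n := by have := length_mkTri n m; omega
      apply List.ext_getElem
      · simp
      · intro l hl1 hl2
        simp only [List.length_map, List.length_range] at hl1
        rw [List.getElem_map, List.getElem_range, List.getElem_map, List.getElem_range]
        exact cellVal_eq_of_ne hy hxy hxn (by omega) (by omega) hkn hidx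
          (by intro he; exact hk (by omega))

theorem idx_origin {n : Int} (hn : 1 ≤ n) : idx n 0 0 = 1 := by
  have := idx_down (n := n) (r := 0) (i := 0) (by omega) (by omega) (by omega)
  simpa using this

theorem mkTri_zero_row {n : Int} {k : Nat} (hk : (k:Int) < n) (zs : List Int)
    (hlen : zs.length = k+1) (hz : ∀ l (h : l < zs.length), zs[l] = 0) :
    zs = (List.range (k+1)).map (fun (j : Nat) => cellVal n 0 ((k : Nat) : Int) (j : Int)) := by
  apply List.ext_getElem
  · simpa using hlen
  · intro l h1 h2
    rw [hz l h1, List.getElem_map, List.getElem_range]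
    simp only [hlen] at h1
    have := idx_pos (n := n) (i := (k:Int)) (j := (l:Int)) (by omega) (by omega) hk
    unfold cellVal
    rw [if_neg (by omega)]

theorem init_zero {n : Int} (hn : 1 ≤ n) :
    (PySem.List.pyRange 1 (n+1) 1).map
      (fun x => (PySem.List.pyRange 0 x 1).map (fun _ => (0 : Int))) = mkTri n 0 := by
  rw [PySem.List.pyRange_one, List.map_map]
  apply List.ext_getElem
  · simp [length_mkTri]
  · intro k h1 h2
    rw [List.getElem_map, List.getElem_range, getElem_mkTri h2]
    simp only [List.length_map, List.length_range] at h1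
    simp only [Function.comp_apply]
    apply mkTri_zero_row (by omega)
    · simp [PySem.List.length_pyRange_one]; omega
    · intro l h
      simp

theorem init_mkTri {n : Int} (hn : 1 ≤ n) :
    setCell ((PySem.List.pyRange 1 (n+1) 1).map
      (fun x => (PySem.List.pyRange 0 x 1).map (fun _ => (0 : Int)))) 0 0 1 = mkTri n 1 := by
  rw [init_zero hn]
  have := setCell_mkTri (n := n) (m := 0) (x := 0) (y := 0) (by omega) (by omega)
    (by omega) (by rw [idx_origin hn]; omega)
  simpa using this

theorem init_zero_B {n : Int} (hn : 1 ≤ n) :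
    (PySem.List.pyRange 1 (n+1) 1).map (fun k => List.replicate k.toNat (0 : Int)) = mkTri n 0 := by
  rw [PySem.List.pyRange_one, List.map_map]
  apply List.ext_getElem
  · simp [length_mkTri]
  · intro k h1 h2
    rw [List.getElem_map, List.getElem_range, getElem_mkTri h2]
    simp only [List.length_map, List.length_range] at h1
    simp only [Function.comp_apply]
    apply mkTri_zero_row (by omega)
    · simp; omega
    · intro l h
      simp

theorem init_mkTri_B {n : Int} (hn : 1 ≤ n) :
    setCell ((PySem.List.pyRange 1 (n+1) 1).map
      (fun k => List.replicate k.toNat (0 : Int))) 0 0 1 = mkTri n 1 := by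
  rw [init_zero_B hn]
  have := setCell_mkTri (n := n) (m := 0) (x := 0) (y := 0) (by omega) (by omega)
    (by omega) (by rw [idx_origin hn]; omega)
  simpa using this


-- ---------- A-side simulation lemmas ----------

theorem loopA_move (n : Int) (fuel : Nat) (tri : List (List Int)) (x y dir count number : Int)
    (hc : count < 2)
    (hin : ¬(x + dxA dir ≥ n ∨ x + dxA dir < 0 ∨ y + dyA dir ≥ n ∨ y + dyA dir < 0 ∨
      getCell tri (x + dxA dir) (y + dyA dir) ≠ 0)) :
    loopA n (fuel+1) tri x y dir count number =
      loopA n fuel (setCell tri (x + dxA dir) (y + dyA dir) (number+1))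
        (x + dxA dir) (y + dyA dir) dir 0 (number+1) := by
  simp only [loopA]
  rw [if_pos hc, if_neg hin]

theorem loopA_turn (n : Int) (fuel : Nat) (tri : List (List Int)) (x y dir count number : Int)
    (hc : count < 2)
    (hblk : x + dxA dir ≥ n ∨ x + dxA dir < 0 ∨ y + dyA dir ≥ n ∨ y + dyA dir < 0 ∨
      getCell tri (x + dxA dir) (y + dyA dir) ≠ 0) :
    loopA n (fuel+1) tri x y dir count number =
      loopA n fuel tri x y ((dir + 1) % 3) (count+1) number := by
  simp only [loopA]
  rw [if_pos hc, if_pos hblk]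

theorem loopA_done (n : Int) (fuel : Nat) (tri : List (List Int)) (x y dir count number : Int)
    (hc : ¬ count < 2) :
    loopA n fuel tri x y dir count number = tri := by
  cases fuel with
  | zero => rfl
  | succ f => simp only [loopA]; rw [if_neg hc]

-- a single unblocked move in each direction, on a mkTri state
theorem A_move_down (n r i m c : Int) (fuel : Nat) (hr : 0 ≤ r) (hc0 : 0 ≤ c) (hc : c < 2)
    (h1 : 2*r ≤ i + 1) (h2 : i + 1 ≤ n-1-r) (hm : m = T n - T (n-3*r) + (i - 2*r) + 1) :
    loopA n (fuel+1) (mkTri n m) i r 0 c m = loopA n fuel (mkTri n (m+1)) (i+1) r 0 (0:Int) (m+1) := by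
  have hxd : i + dxA 0 = i + 1 := by norm_num [dxA]
  have hyd : r + dyA 0 = r := by norm_num [dyA]
  have hidx : idx n (i+1) r = m + 1 := by
    rw [idx_down hr (by omega) (by omega)]; omega
  have hcell : getCell (mkTri n m) (i+1) r = 0 := by
    rw [getCell_mkTri hr (by omega) (by omega)]
    unfold cellVal
    rw [hidx, if_neg (by omega)]
  have hset : setCell (mkTri n m) (i+1) r (m+1) = mkTri n (m+1) :=
    setCell_mkTri hr (by omega) (by omega) hidx
  rw [loopA_move n fuel _ i r 0 c m hc
      (by
        rw [hxd, hyd]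
        intro hOr
        rcases hOr with h|h|h|h|h
        · omega
        · omega
        · omega
        · omega
        · exact h hcell)]
  rw [hxd, hyd, hset]

theorem A_move_right (n r j m c : Int) (fuel : Nat) (hr : 0 ≤ r) (hc0 : 0 ≤ c) (hc : c < 2)
    (h1 : r ≤ j) (h2 : j + 1 ≤ n-1-2*r) (hm : m = T n - T (n-3*r) + (n-3*r) + (j - r)) :
    loopA n (fuel+1) (mkTri n m) (n-1-r) j 1 c m =
      loopA n fuel (mkTri n (m+1)) (n-1-r) (j+1) 1 (0:Int) (m+1) := by
  have hxd : (n-1-r) + dxA 1 = n-1-r := by norm_num [dxA]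
  have hyd : j + dyA 1 = j + 1 := by norm_num [dyA]
  have hidx : idx n (n-1-r) (j+1) = m + 1 := by
    rw [idx_right hr (by omega) (by omega)]; omega
  have hcell : getCell (mkTri n m) (n-1-r) (j+1) = 0 := by
    rw [getCell_mkTri (by omega) (by omega) (by omega)]
    unfold cellVal
    rw [hidx, if_neg (by omega)]
  have hset : setCell (mkTri n m) (n-1-r) (j+1) (m+1) = mkTri n (m+1) :=
    setCell_mkTri (by omega) (by omega) (by omega) hidx
  rw [loopA_move n fuel _ (n-1-r) j 1 c m hc
      (by
        rw [hxd, hyd]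
        intro hOr
        rcases hOr with h|h|h|h|h
        · omega
        · omega
        · omega
        · omega
        · exact h hcell)]
  rw [hxd, hyd, hset]

theorem A_move_up (n r i j m c : Int) (fuel : Nat) (hr : 0 ≤ r) (hc0 : 0 ≤ c) (hc : c < 2)
    (hij : i = j + r) (h1 : r + 1 ≤ j - 1) (h2 : i ≤ n-1-r)
    (hm : m = T n - T (n-3*r) + 2*(n-3*r) - 1 + (n-1-r-i)) :
    loopA n (fuel+1) (mkTri n m) i j 2 c m =
      loopA n fuel (mkTri n (m+1)) (i-1) (j-1) 2 (0:Int) (m+1) := by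
  have hxd : i + dxA 2 = i - 1 := by norm_num [dxA]; omega
  have hyd : j + dyA 2 = j - 1 := by norm_num [dyA]; omega
  have hidx : idx n (i-1) (j-1) = m + 1 := by
    rw [idx_up hr (by omega) (by omega : i - 1 = (j-1) + r) (by omega)]; omega
  have hcell : getCell (mkTri n m) (i-1) (j-1) = 0 := by
    rw [getCell_mkTri (by omega) (by omega) (by omega)]
    unfold cellVal
    rw [hidx, if_neg (by omega)]
  have hset : setCell (mkTri n m) (i-1) (j-1) (m+1) = mkTri n (m+1) :=
    setCell_mkTri (by omega) (by omega) (by omega) hidx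
  rw [loopA_move n fuel _ i j 2 c m hc
      (by
        rw [hxd, hyd]
        intro hOr
        rcases hOr with h|h|h|h|h
        · omega
        · omega
        · omega
        · omega
        · exact h hcell)]
  rw [hxd, hyd, hset]

-- whole legs
theorem A_down (n r : Int) (hr : 0 ≤ r) : ∀ (d fuel : Nat) (i c m : Int),
    0 ≤ c → c < 2 → 1 ≤ d → 2*r ≤ i → i + (d:Int) = n-1-r →
    m = T n - T (n-3*r) + (i - 2*r) + 1 →
    loopA n (fuel + d) (mkTri n m) i r 0 c m =
      loopA n fuel (mkTri n (m + d)) (n-1-r) r 0 (0:Int) (m + d) := by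
  intro d
  induction d with
  | zero => intro fuel i c m hc0 hc hd h1 h2 hm; exact absurd hd (by omega)
  | succ d ih =>
    intro fuel i c m hc0 hc hd h1 h2 hm
    rw [show fuel + (d+1) = (fuel + d) + 1 by omega,
        A_move_down n r i m c (fuel + d) hr hc0 hc (by omega) (by omega) hm]
    rcases Nat.eq_zero_or_pos d with h0 | hpos
    · subst h0
      simp only [Nat.add_zero, Nat.cast_zero, Nat.cast_one]
      have : i + 1 = n-1-r := by push_cast at h2; omega
      rw [this]
      congr 1 <;> push_cast <;> omega
    · have hih := ih (fuel) (i+1) 0 (m+1) (by omega) (by omega) hpos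
        (by show (2:Int)*r ≤ i+1; omega)
        (by show i+1 + (d:Int) = n-1-r; push_cast at h2; omega)
        (by show m+1 = T n - T (n-3*r) + (i+1 - 2*r) + 1; omega)
      rw [show (m + ((d + 1 : Nat) : Int)) = (m + 1) + (d : Int) by push_cast; ring]
      exact hih

theorem A_right (n r : Int) (hr : 0 ≤ r) : ∀ (d fuel : Nat) (j c m : Int),
    0 ≤ c → c < 2 → 1 ≤ d → r ≤ j → j + (d:Int) = n-1-2*r →
    m = T n - T (n-3*r) + (n-3*r) + (j - r) →
    loopA n (fuel + d) (mkTri n m) (n-1-r) j 1 c m =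
      loopA n fuel (mkTri n (m + d)) (n-1-r) (n-1-2*r) 1 (0:Int) (m + d) := by
  intro d
  induction d with
  | zero => intro fuel j c m hc0 hc hd h1 h2 hm; exact absurd hd (by omega)
  | succ d ih =>
    intro fuel j c m hc0 hc hd h1 h2 hm
    rw [show fuel + (d+1) = (fuel + d) + 1 by omega,
        A_move_right n r j m c (fuel + d) hr hc0 hc h1 (by push_cast at h2; omega) hm]
    rcases Nat.eq_zero_or_pos d with h0 | hpos
    · subst h0
      simp only [Nat.add_zero, Nat.cast_zero, Nat.cast_one]
      have : j + 1 = n-1-2*r := by push_cast at h2; omega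
      rw [this]
      congr 1 <;> push_cast <;> omega
    · have hih := ih (fuel) (j+1) 0 (m+1) (by omega) (by omega) hpos
        (by show r ≤ j+1; omega)
        (by show j+1 + (d:Int) = n-1-2*r; push_cast at h2; omega)
        (by show m+1 = T n - T (n-3*r) + (n-3*r) + (j+1 - r); omega)
      rw [show (m + ((d + 1 : Nat) : Int)) = (m + 1) + (d : Int) by push_cast; ring]
      exact hih

theorem A_up (n r : Int) (hr : 0 ≤ r) : ∀ (d fuel : Nat) (i j c m : Int),
    0 ≤ c → c < 2 → 1 ≤ d → i = j + r → r + 1 ≤ j - (d:Int) → i ≤ n-1-r →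
    m = T n - T (n-3*r) + 2*(n-3*r) - 1 + (n-1-r-i) →
    loopA n (fuel + d) (mkTri n m) i j 2 c m =
      loopA n fuel (mkTri n (m + d)) (i - d) (j - d) 2 (0:Int) (m + d) := by
  intro d
  induction d with
  | zero => intro fuel i j c m hc0 hc hd hij h1 h2 hm; exact absurd hd (by omega)
  | succ d ih =>
    intro fuel i j c m hc0 hc hd hij h1 h2 hm
    push_cast at h1
    rw [show fuel + (d+1) = (fuel + d) + 1 by omega,
        A_move_up n r i j m c (fuel + d) hr hc0 hc hij (by omega) h2 hm]
    rcases Nat.eq_zero_or_pos d with h0 | hpos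
    · subst h0
      simp only [Nat.add_zero, Nat.cast_zero, Nat.cast_one]
      congr 1 <;> push_cast <;> omega
    · have hih := ih (fuel) (i-1) (j-1) 0 (m+1) (by omega) (by omega) hpos
        (by show i-1 = (j-1) + r; omega)
        (by show r + 1 ≤ (j-1) - (d:Int); push_cast; omega)
        (by show i-1 ≤ n-1-r; omega)
        (by show m+1 = T n - T (n-3*r) + 2*(n-3*r) - 1 + (n-1-r-(i-1)); omega)
      rw [show (m + ((d + 1 : Nat) : Int)) = (m + 1) + (d : Int) by push_cast; ring,
          show i - ((d + 1 : Nat) : Int) = i - 1 - (d : Int) by push_cast; ring,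
          show j - ((d + 1 : Nat) : Int) = j - 1 - (d : Int) by push_cast; ring]
      exact hih


theorem filled_ne {n m a b : Int} (h0 : 0 ≤ b) (hab : b ≤ a) (han : a < n)
    (h2 : idx n a b ≤ m) : getCell (mkTri n m) a b ≠ 0 := by
  rw [getCell_mkTri h0 hab han]
  unfold cellVal
  rw [if_pos h2]
  have := idx_pos h0 hab han
  omega

theorem A_ring (n r : Int) (hr : 0 ≤ r) (hs : 4 ≤ n - 3*r) : ∀ (fuel : Nat),
    loopA n (fuel + (3*(n-3*r)).toNat) (mkTri n (T n - T (n-3*r) + 1)) (2*r) r 0 0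
      (T n - T (n-3*r) + 1) =
    loopA n fuel (mkTri n (T n - T (n-3*(r+1)) + 1)) (2*(r+1)) (r+1) 0 0
      (T n - T (n-3*(r+1)) + 1) := by
  intro fuel
  obtain ⟨s, hsdef⟩ : ∃ s, n - 3*r = s := ⟨_, rfl⟩
  rw [hsdef]
  have hs' : 4 ≤ s := by omega
  have hTs : T (n-3*r) = T s := by rw [hsdef]
  have hTs3 : T (n-3*(r-1)) = T (s+3) := by rw [show n-3*(r-1) = s+3 by omega]
  have hTm3 : T (n-3*(r+1)) = T (s-3) := by rw [show n-3*(r+1) = s-3 by omega]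
  have hdelta := T_delta (s := s) (by omega)
  have hd4 := T_delta (s := s+3)
  rw [show s+3-3 = s by ring] at hd4
  specialize hd4 (by omega)
  -- leg 1: down, s-1 moves
  rw [show fuel + (3*s).toNat = (fuel + 1 + 1 + (s-2).toNat + 1 + (s-1).toNat + 1) + (s-1).toNat
        by omega,
      A_down n r hr (s-1).toNat _ (2*r) 0 (T n - T s + 1) (by omega) (by omega) (by omega)
        (by omega) (by push_cast; omega) (by omega),
      show T n - T s + 1 + (((s-1).toNat : Nat) : Int) = T n - T s + s by push_cast; omega]
  -- turn 1: probe (n-r, r)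
  have hxd0 : (n-1-r) + dxA 0 = n - r := by norm_num [dxA]; omega
  have hyd0 : r + dyA 0 = r := by norm_num [dyA]
  rw [loopA_turn n (fuel + 1 + 1 + (s-2).toNat + 1 + (s-1).toNat) (mkTri n (T n - T s + s))
      (n-1-r) r 0 0 (T n - T s + s) (by omega) (by
    rw [hxd0, hyd0]
    rcases eq_or_lt_of_le hr with h0 | h1
    · left; omega
    · right; right; right; right
      apply filled_ne (by omega) (by omega) (by omega)
      have := idx_right (n := n) (r := r-1) (j := r) (by omega) (by omega) (by omega)
      rw [show n-1-(r-1) = n-r by ring, show n-3*(r-1) = s+3 by omega] at this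
      omega)]
  rw [show ((0:Int)+1) % 3 = 1 by decide, show (0:Int)+1 = 1 by norm_num]
  -- leg 2: right, s-1 moves
  rw [show fuel + 1 + 1 + (s-2).toNat + 1 + (s-1).toNat = (fuel + 1 + 1 + (s-2).toNat + 1) + (s-1).toNat
        by omega,
      A_right n r hr (s-1).toNat _ r 1 (T n - T s + s) (by omega) (by omega) (by omega)
        (by omega) (by push_cast; omega) (by omega),
      show T n - T s + s + (((s-1).toNat : Nat) : Int) = T n - T s + (2*s - 1) by push_cast; omega]
  -- turn 2: probe (n-1-r, n-2r)
  have hxd1 : (n-1-r) + dxA 1 = n-1-r := by norm_num [dxA]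
  have hyd1 : (n-1-2*r) + dyA 1 = n-2*r := by norm_num [dyA]; omega
  rw [loopA_turn n (fuel + 1 + 1 + (s-2).toNat) (mkTri n (T n - T s + (2*s-1)))
      (n-1-r) (n-1-2*r) 1 0 (T n - T s + (2*s-1)) (by omega) (by
    rw [hxd1, hyd1]
    rcases eq_or_lt_of_le hr with h0 | h1
    · right; right; left; omega
    · right; right; right; right
      apply filled_ne (by omega) (by omega) (by omega)
      have := idx_up (n := n) (r := r-1) (i := n-1-r) (j := n-2*r) (by omega) (by omega)
        (by omega) (by omega)
      rw [show n-3*(r-1) = s+3 by omega] at this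
      omega)]
  rw [show ((1:Int)+1) % 3 = 2 by decide, show (0:Int)+1 = 1 by norm_num]
  -- leg 3: up-left, s-2 moves
  rw [show fuel + 1 + 1 + (s-2).toNat = (fuel + 1 + 1) + (s-2).toNat by omega,
      A_up n r hr (s-2).toNat _ (n-1-r) (n-1-2*r) 1 (T n - T s + (2*s-1)) (by omega) (by omega)
        (by omega) (by omega) (by push_cast; omega) (by omega) (by omega),
      show T n - T s + (2*s-1) + (((s-2).toNat : Nat) : Int) = T n - T s + (3*s - 3) by push_cast; omega,
      show (n-1-r) - (((s-2).toNat : Nat) : Int) = 2*r+1 by push_cast; omega,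
      show (n-1-2*r) - (((s-2).toNat : Nat) : Int) = r+1 by push_cast; omega]
  -- turn 3: probe (2r, r), always filled
  have hxd2 : (2*r+1) + dxA 2 = 2*r := by norm_num [dxA] <;> omega
  have hyd2 : (r+1) + dyA 2 = r := by norm_num [dyA] <;> omega
  rw [loopA_turn n (fuel + 1) (mkTri n (T n - T s + (3*s-3)))
      (2*r+1) (r+1) 2 0 (T n - T s + (3*s-3)) (by omega) (by
    rw [hxd2, hyd2]
    right; right; right; right
    apply filled_ne hr (by omega) (by omega)
    have := idx_down (n := n) (r := r) (i := 2*r) hr (by omega) (by omega)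
    omega)]
  rw [show ((2:Int)+1) % 3 = 0 by decide, show (0:Int)+1 = 1 by norm_num]
  -- entry move down into ring r+1: (2r+1, r+1) -> (2r+2, r+1)
  have hstep := A_move_down (n := n) (r := r+1) (i := 2*r+1) (m := T n - T s + (3*s-3)) (c := 1)
    (fuel := fuel) (by omega) (by omega) (by omega) (by omega)
    (by omega) (by rw [show n-3*(r+1) = s - 3 by omega]; omega)
  rw [hstep]
  rw [show T n - T s + (3*s-3) + 1 = T n - T (n-3*(r+1)) + 1 by
        rw [show n-3*(r+1) = s - 3 by omega]; omega,
      show (2*r+1) + 1 = 2*(r+1) by ring]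


theorem A_fin1 (n r : Int) (hr : 0 ≤ r) (hs : n - 3*r = 1) : ∀ (fuel : Nat),
    loopA n (fuel + 2) (mkTri n (T n - T (n-3*r) + 1)) (2*r) r 0 0 (T n - T (n-3*r) + 1) =
    mkTri n (T n) := by
  intro fuel
  have hT1 : T (n-3*r) = 1 := by rw [hs]; rfl
  have hT4 : T (n-3*(r-1)) = 10 := by rw [show n-3*(r-1) = 4 by omega]; rfl
  have hTn : 1 ≤ T n := by
    have := T_mono (a := 1) (b := n) (by omega) (by omega)
    simpa using this
  have hTn4 : 0 ≤ r - 1 → 10 ≤ T n := by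
    intro h
    have := T_mono (a := 4) (b := n) (by omega) (by omega)
    calc (10:Int) = T 4 := by rfl
    _ ≤ T n := this
  rw [show T n - T (n-3*r) + 1 = T n by omega]
  have hxd0 : (2*r) + dxA 0 = 2*r+1 := by norm_num [dxA] <;> omega
  have hyd0 : r + dyA 0 = r := by norm_num [dyA]
  rw [show fuel + 2 = (fuel + 1) + 1 by omega,
      loopA_turn n (fuel+1) (mkTri n (T n)) (2*r) r 0 0 (T n) (by omega) (by
    rw [hxd0, hyd0]
    rcases eq_or_lt_of_le hr with h0 | h1
    · left; omega
    · right; right; right; right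
      apply filled_ne (by omega) (by omega) (by omega)
      have := idx_right (n := n) (r := r-1) (j := r) (by omega) (by omega) (by omega)
      rw [show n-1-(r-1) = 2*r+1 by omega] at this
      have h10 := hTn4 (by omega)
      omega)]
  rw [show ((0:Int)+1) % 3 = 1 by decide, show (0:Int)+1 = 1 by norm_num]
  have hxd1 : (2*r) + dxA 1 = 2*r := by norm_num [dxA]
  have hyd1 : r + dyA 1 = r+1 := by norm_num [dyA]
  rw [loopA_turn n fuel (mkTri n (T n)) (2*r) r 1 1 (T n) (by omega) (by
    rw [hxd1, hyd1]
    rcases eq_or_lt_of_le hr with h0 | h1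
    · right; right; left; omega
    · right; right; right; right
      apply filled_ne (by omega) (by omega) (by omega)
      have := idx_up (n := n) (r := r-1) (i := 2*r) (j := r+1) (by omega) (by omega)
        (by omega) (by omega)
      have h10 := hTn4 (by omega)
      omega)]
  rw [show ((1:Int)+1) % 3 = 2 by decide, show (1:Int)+1 = 2 by norm_num]
  exact loopA_done n fuel _ (2*r) r 2 2 (T n) (by omega)

theorem A_fin2 (n r : Int) (hr : 0 ≤ r) (hs : n - 3*r = 2) : ∀ (fuel : Nat),
    loopA n (fuel + 5) (mkTri n (T n - T (n-3*r) + 1)) (2*r) r 0 0 (T n - T (n-3*r) + 1) =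
    mkTri n (T n) := by
  intro fuel
  have hT2 : T (n-3*r) = 3 := by rw [hs]; rfl
  have hT5 : T (n-3*(r-1)) = 15 := by rw [show n-3*(r-1) = 5 by omega]; rfl
  have hTn : 3 ≤ T n := by
    calc (3:Int) = T 2 := by rfl
    _ ≤ T n := T_mono (by omega) (by omega)
  have hTn5 : 0 ≤ r - 1 → 15 ≤ T n := by
    intro h
    calc (15:Int) = T 5 := by rfl
    _ ≤ T n := T_mono (by omega) (by omega)
  -- move down
  rw [show fuel + 5 = ((((fuel + 1) + 1) + 1) + 1) + 1 by omega,
      A_move_down n r (2*r) (T n - T (n-3*r) + 1) 0 ((((fuel+1)+1)+1)+1) hr (by omega) (by omega)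
        (by omega) (by omega) (by omega),
      show T n - T (n-3*r) + 1 + 1 = T n - 1 by omega]
  -- turn 1: probe (2r+2, r)
  have hxd0 : (2*r+1) + dxA 0 = 2*r+2 := by norm_num [dxA] <;> omega
  have hyd0 : r + dyA 0 = r := by norm_num [dyA]
  rw [loopA_turn n (((fuel+1)+1)+1) (mkTri n (T n - 1)) (2*r+1) r 0 0 (T n - 1) (by omega) (by
    rw [hxd0, hyd0]
    rcases eq_or_lt_of_le hr with h0 | h1
    · left; omega
    · right; right; right; right
      apply filled_ne (by omega) (by omega) (by omega)
      have := idx_right (n := n) (r := r-1) (j := r) (by omega) (by omega) (by omega)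
      rw [show n-1-(r-1) = 2*r+2 by omega] at this
      have h15 := hTn5 (by omega)
      omega)]
  rw [show ((0:Int)+1) % 3 = 1 by decide, show (0:Int)+1 = 1 by norm_num]
  -- move right
  rw [show (2*r+1 : Int) = n-1-r by omega,
      A_move_right n r r (T n - 1) 1 ((fuel+1)+1) hr (by omega) (by omega) (by omega)
        (by omega) (by omega),
      show T n - 1 + 1 = T n by omega,
      show (n-1-r : Int) = 2*r+1 by omega]
  -- turn 2: probe (2r+1, r+2)
  have hxd1 : (2*r+1) + dxA 1 = 2*r+1 := by norm_num [dxA]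
  have hyd1 : (r+1) + dyA 1 = r+2 := by norm_num [dyA] <;> omega
  rw [loopA_turn n (fuel+1) (mkTri n (T n)) (2*r+1) (r+1) 1 0 (T n) (by omega) (by
    rw [hxd1, hyd1]
    rcases eq_or_lt_of_le hr with h0 | h1
    · right; right; left; omega
    · right; right; right; right
      apply filled_ne (by omega) (by omega) (by omega)
      have := idx_up (n := n) (r := r-1) (i := 2*r+1) (j := r+2) (by omega) (by omega)
        (by omega) (by omega)
      have h15 := hTn5 (by omega)
      omega)]
  rw [show ((1:Int)+1) % 3 = 2 by decide, show (0:Int)+1 = 1 by norm_num]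
  -- turn 3: probe (2r, r)
  have hxd2 : (2*r+1) + dxA 2 = 2*r := by norm_num [dxA] <;> omega
  have hyd2 : (r+1) + dyA 2 = r := by norm_num [dyA] <;> omega
  rw [loopA_turn n fuel (mkTri n (T n)) (2*r+1) (r+1) 2 1 (T n) (by omega) (by
    rw [hxd2, hyd2]
    right; right; right; right
    apply filled_ne hr (by omega) (by omega)
    have := idx_down (n := n) (r := r) (i := 2*r) hr (by omega) (by omega)
    omega)]
  exact loopA_done n fuel _ (2*r+1) (r+1) (((2:Int)+1)%3) (1+1) (T n) (by omega)

theorem A_fin3 (n r : Int) (hr : 0 ≤ r) (hs : n - 3*r = 3) : ∀ (fuel : Nat),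
    loopA n (fuel + 9) (mkTri n (T n - T (n-3*r) + 1)) (2*r) r 0 0 (T n - T (n-3*r) + 1) =
    mkTri n (T n) := by
  intro fuel
  have hT3 : T (n-3*r) = 6 := by rw [hs]; rfl
  have hT6 : T (n-3*(r-1)) = 21 := by rw [show n-3*(r-1) = 6 by omega]; rfl
  have hTn : 6 ≤ T n := by
    calc (6:Int) = T 3 := by rfl
    _ ≤ T n := T_mono (by omega) (by omega)
  have hTn6 : 0 ≤ r - 1 → 21 ≤ T n := by
    intro h
    calc (21:Int) = T 6 := by rfl
    _ ≤ T n := T_mono (by omega) (by omega)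
  -- down leg: 2 moves
  rw [show fuel + 9 = ((((((fuel + 1) + 1) + 1) + 1) + 1) + 1 + 1) + 2 by omega,
      A_down n r hr 2 _ (2*r) 0 (T n - T (n-3*r) + 1) (by omega) (by omega)
        (by omega) (by omega) (by push_cast; omega) (by omega),
      show T n - T (n-3*r) + 1 + ((2:Nat) : Int) = T n - 3 by push_cast; omega,
      show n-1-r = 2*r+2 by omega]
  -- turn 1: probe (2r+3, r)
  have hxd0 : (2*r+2) + dxA 0 = 2*r+3 := by norm_num [dxA] <;> omega
  have hyd0 : r + dyA 0 = r := by norm_num [dyA]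
  rw [loopA_turn n (((((fuel+1)+1)+1)+1)+1+1) (mkTri n (T n - 3)) (2*r+2) r 0 0 (T n - 3)
      (by omega) (by
    rw [hxd0, hyd0]
    rcases eq_or_lt_of_le hr with h0 | h1
    · left; omega
    · right; right; right; right
      apply filled_ne (by omega) (by omega) (by omega)
      have := idx_right (n := n) (r := r-1) (j := r) (by omega) (by omega) (by omega)
      rw [show n-1-(r-1) = 2*r+3 by omega] at this
      have h21 := hTn6 (by omega)
      omega)]
  rw [show ((0:Int)+1) % 3 = 1 by decide, show (0:Int)+1 = 1 by norm_num]
  -- right leg: 2 moves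
  rw [show ((((fuel+1)+1)+1)+1)+1+1 = ((((fuel+1)+1)+1)+1) + 2 by omega,
      show (2*r+2 : Int) = n-1-r by omega,
      A_right n r hr 2 _ r 1 (T n - 3) (by omega) (by omega) (by omega)
        (by omega) (by push_cast; omega) (by omega),
      show T n - 3 + ((2:Nat) : Int) = T n - 1 by push_cast; omega,
      show n-1-2*r = r+2 by omega, show (n-1-r : Int) = 2*r+2 by omega]
  -- turn 2: probe (2r+2, r+3)
  have hxd1 : (2*r+2) + dxA 1 = 2*r+2 := by norm_num [dxA]
  have hyd1 : (r+2) + dyA 1 = r+3 := by norm_num [dyA] <;> omega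
  rw [show fuel + 4 = (fuel+3) + 1 by omega]
  rw [loopA_turn n (fuel+3) (mkTri n (T n - 1)) (2*r+2) (r+2) 1 0 (T n - 1)
      (by omega) (by
    rw [hxd1, hyd1]
    rcases eq_or_lt_of_le hr with h0 | h1
    · right; right; left; omega
    · right; right; right; right
      apply filled_ne (by omega) (by omega) (by omega)
      have := idx_up (n := n) (r := r-1) (i := 2*r+2) (j := r+3) (by omega) (by omega)
        (by omega) (by omega)
      have h21 := hTn6 (by omega)
      omega)]
  rw [show ((1:Int)+1) % 3 = 2 by decide, show (0:Int)+1 = 1 by norm_num]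
  -- up-left move
  rw [show fuel + 3 = (fuel+2) + 1 by omega]
  rw [A_move_up n r (2*r+2) (r+2) (T n - 1) 1 (fuel+2) hr (by omega) (by omega)
        (by omega) (by omega) (by omega) (by omega),
      show T n - 1 + 1 = T n by omega,
      show (2*r+2) - 1 = 2*r+1 by ring, show (r+2) - 1 = r+1 by ring]
  -- turn 3: probe (2r, r)
  have hxd2 : (2*r+1) + dxA 2 = 2*r := by norm_num [dxA] <;> omega
  have hyd2 : (r+1) + dyA 2 = r := by norm_num [dyA] <;> omega
  rw [show fuel + 2 = (fuel+1) + 1 by omega]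
  rw [loopA_turn n (fuel+1) (mkTri n (T n)) (2*r+1) (r+1) 2 0 (T n) (by omega) (by
    rw [hxd2, hyd2]
    right; right; right; right
    apply filled_ne hr (by omega) (by omega)
    have := idx_down (n := n) (r := r) (i := 2*r) hr (by omega) (by omega)
    omega)]
  rw [show ((2:Int)+1) % 3 = 0 by decide, show (0:Int)+1 = 1 by norm_num]
  -- turn 4: probe (2r+2, r+1), bottom row of ring r
  have hxd3 : (2*r+1) + dxA 0 = 2*r+2 := by norm_num [dxA] <;> omega
  have hyd3 : (r+1) + dyA 0 = r+1 := by norm_num [dyA]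
  rw [loopA_turn n fuel (mkTri n (T n)) (2*r+1) (r+1) 0 1 (T n) (by omega) (by
    rw [hxd3, hyd3]
    right; right; right; right
    apply filled_ne (by omega) (by omega) (by omega)
    have := idx_right (n := n) (r := r) (j := r+1) (by omega) (by omega) (by omega)
    rw [show n-1-r = 2*r+2 by omega] at this
    omega)]
  exact loopA_done n fuel _ (2*r+1) (r+1) (((0:Int)+1)%3) (1+1) (T n) (by omega)


theorem A_main (n : Int) : ∀ (sN : Nat) (r : Int) (fuel : Nat), 0 ≤ r → 1 ≤ n - 3*r →
    (n - 3*r).toNat = sN → sN*sN + 12 ≤ fuel →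
    loopA n fuel (mkTri n (T n - T (n-3*r) + 1)) (2*r) r 0 0 (T n - T (n-3*r) + 1) =
      mkTri n (T n) := by
  intro sN
  induction sN using Nat.strong_induction_on with
  | _ sN ih =>
    intro r fuel hr hs hsN hfuel
    rcases Nat.lt_or_ge sN 4 with hsmall | hbig
    · have h123 : sN = 1 ∨ sN = 2 ∨ sN = 3 := by omega
      rcases h123 with h | h | h
      · rw [show fuel = (fuel - 2) + 2 by omega]
        exact A_fin1 n r hr (by omega) _
      · rw [show fuel = (fuel - 5) + 5 by omega]
        exact A_fin2 n r hr (by omega) _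
      · rw [show fuel = (fuel - 9) + 9 by omega]
        exact A_fin3 n r hr (by omega) _
    · have hb : 4 ≤ n - 3*r := by omega
      have h3s : 3*sN ≤ sN*sN := by nlinarith
      have hquad : (sN-3)*(sN-3) + 3*sN ≤ sN*sN := by nlinarith [Nat.sub_add_cancel (show 3 ≤ sN by omega)]
      rw [show fuel = (fuel - (3*(n-3*r)).toNat) + (3*(n-3*r)).toNat by omega,
          A_ring n r hr hb _]
      exact ih (sN - 3) (by omega) (r+1) _ (by omega) (by omega) (by omega) (by omega)

theorem foldl_append_eq_flatten (t : List (List Int)) : ∀ (acc : List Int),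
    t.foldl (fun a r => a ++ r) acc = acc ++ t.flatten := by
  induction t with
  | nil => intro acc; simp
  | cons h tl ih => intro acc; simp [ih]

theorem solutionA_eq (n : Int) (hn : 1 ≤ n) :
    solution n = (mkTri n (T n)).flatten := by
  have hA := A_main n n.toNat 0 (n.toNat*n.toNat+12) (by omega) (by omega) (by omega) (le_refl _)
  rw [show n-3*0 = n by ring, show T n - T n + 1 = 1 by omega, show (2:Int)*0 = 0 by ring] at hA
  simp only [solution]
  rw [init_mkTri hn, hA, foldl_append_eq_flatten]
  simp


-- ---------- B-side simulation lemmas ----------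

theorem foldl_const_iterate {α : Type} (f : α → α) : ∀ (l : List Int) (st : α),
    l.foldl (fun st _ => f st) st = f^[l.length] st := by
  intro l
  induction l with
  | nil => intro st; rfl
  | cons x xs ih =>
    intro st
    rw [List.foldl_cons, List.length_cons, Function.iterate_succ_apply]
    exact ih (f st)

theorem legsB_nil (st : List (List Int) × Int × Int × Int) : legsB [] st = st := rfl

theorem legsB_cons (p : Int × Int) (ps : List (Int × Int))
    (st : List (List Int) × Int × Int × Int) :
    legsB (p :: ps) st = legsB ps ((stepB (stepsB (p.1 % 3)))^[p.2.toNat] st) := by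
  simp only [legsB, List.foldl_cons]
  rw [foldl_const_iterate]
  rw [PySem.List.length_pyRange_one, Int.sub_zero]

theorem B_down (n r : Int) (hr : 0 ≤ r) : ∀ (d : Nat) (i m : Int),
    2*r ≤ i + 1 → i + (d:Int) ≤ n-1-r → m = T n - T (n-3*r) + (i - 2*r) + 1 →
    (stepB ((1:Int),(0:Int)))^[d] (mkTri n m, i, r, m+1) =
      (mkTri n (m + d), i + d, r, m + d + 1) := by
  intro d
  induction d with
  | zero => intro i m h1 h2 hm; simp
  | succ d ih =>
    intro i m h1 h2 hm
    push_cast at h2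
    rw [Function.iterate_succ_apply]
    have hidx : idx n (i+1) r = m + 1 := by
      rw [idx_down hr (by omega) (by omega)]; omega
    have hstep : stepB ((1:Int),(0:Int)) (mkTri n m, i, r, m+1) =
        (mkTri n (m+1), i+1, r, (m+1)+1) := by
      simp only [stepB]
      rw [show r + (0:Int) = r by ring, setCell_mkTri hr (by omega) (by omega) hidx]
    rw [hstep, ih (i+1) (m+1) (by omega) (by push_cast; omega) (by omega)]
    refine congrArg₂ _ (by push_cast; ring_nf) ?_
    refine congrArg₂ _ (by push_cast; ring_nf) ?_
    refine congrArg₂ _ rfl (by push_cast; ring_nf)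

theorem B_right (n r : Int) (hr : 0 ≤ r) : ∀ (d : Nat) (j m : Int),
    r ≤ j → j + (d:Int) ≤ n-1-2*r → m = T n - T (n-3*r) + (n-3*r) + (j - r) →
    (stepB ((0:Int),(1:Int)))^[d] (mkTri n m, n-1-r, j, m+1) =
      (mkTri n (m + d), n-1-r, j + d, m + d + 1) := by
  intro d
  induction d with
  | zero => intro j m h1 h2 hm; simp
  | succ d ih =>
    intro j m h1 h2 hm
    push_cast at h2
    rw [Function.iterate_succ_apply]
    have hidx : idx n (n-1-r) (j+1) = m + 1 := by
      rw [idx_right hr (by omega) (by omega)]; omega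
    have hstep : stepB ((0:Int),(1:Int)) (mkTri n m, n-1-r, j, m+1) =
        (mkTri n (m+1), n-1-r, j+1, (m+1)+1) := by
      simp only [stepB]
      rw [show (n-1-r) + (0:Int) = n-1-r by ring, setCell_mkTri (by omega) (by omega) (by omega) hidx]
    rw [hstep, ih (j+1) (m+1) (by omega) (by push_cast; omega) (by omega)]
    refine congrArg₂ _ (by push_cast; ring_nf) ?_
    refine congrArg₂ _ rfl ?_
    refine congrArg₂ _ (by push_cast; ring_nf) (by push_cast; ring_nf)

theorem B_up (n r : Int) (hr : 0 ≤ r) : ∀ (d : Nat) (i j m : Int),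
    i = j + r → r + 1 ≤ j - (d:Int) → i ≤ n-1-r →
    m = T n - T (n-3*r) + 2*(n-3*r) - 1 + (n-1-r-i) →
    (stepB ((-1:Int),(-1:Int)))^[d] (mkTri n m, i, j, m+1) =
      (mkTri n (m + d), i - d, j - d, m + d + 1) := by
  intro d
  induction d with
  | zero => intro i j m hij h1 h2 hm; simp
  | succ d ih =>
    intro i j m hij h1 h2 hm
    push_cast at h1
    rw [Function.iterate_succ_apply]
    have hidx : idx n (i-1) (j-1) = m + 1 := by
      rw [idx_up hr (by omega) (by omega : i - 1 = (j-1) + r) (by omega)]; omega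
    have hstep : stepB ((-1:Int),(-1:Int)) (mkTri n m, i, j, m+1) =
        (mkTri n (m+1), i-1, j-1, (m+1)+1) := by
      simp only [stepB]
      rw [show i + (-1:Int) = i - 1 by ring, show j + (-1:Int) = j - 1 by ring,
          setCell_mkTri (by omega) (by omega) (by omega) hidx]
    rw [hstep, ih (i-1) (j-1) (m+1) (by omega) (by push_cast; omega) (by omega) (by omega)]
    refine congrArg₂ _ (by push_cast; ring_nf) ?_
    refine congrArg₂ _ (by push_cast; ring_nf) ?_
    refine congrArg₂ _ (by push_cast; ring_nf) (by push_cast; ring_nf)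


theorem legsB_cons' (a b : Int) (ps : List (Int × Int))
    (st : List (List Int) × Int × Int × Int) :
    legsB ((a, b) :: ps) st = legsB ps ((stepB (stepsB (a % 3)))^[b.toNat] st) :=
  legsB_cons (a, b) ps st

theorem B_main (n : Int) : ∀ (sN : Nat) (r : Int), 1 ≤ r → n - 3*r = (sN:Int) →
    1 ≤ sN →
    (legsB (PySem.List.enumerate (PySem.List.pyRange (n-3*r) 0 (-1)) (3*r))
      (mkTri n (T n - T (n-3*r)), 2*r-1, r, T n - T (n-3*r) + 1)).1 = mkTri n (T n) := by
  intro sN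
  induction sN using Nat.strong_induction_on with
  | _ sN ih =>
    intro r hr hs h1
    have hsi : 1 ≤ n - 3*r := by omega
    -- leg at index 3r: direction down, n-3r moves (entry move + the down leg)
    rw [PySem.List.pyRange_neg_one_cons (by omega), PySem.List.enumerate_cons, legsB_cons',
        show ((3*r) % 3 : Int) = 0 by omega,
        show stepsB 0 = ((1:Int),(0:Int)) from rfl,
        B_down n r (by omega) (n-3*r).toNat (2*r-1) (T n - T (n-3*r)) (by omega)
          (by push_cast; omega) (by omega),
        show T n - T (n-3*r) + (((n-3*r).toNat : Nat) : Int) = T n - T (n-3*r) + (n-3*r)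
          by push_cast; omega,
        show 2*r-1 + (((n-3*r).toNat : Nat) : Int) = n-1-r by push_cast; omega]
    by_cases hc1 : sN = 1
    · rw [PySem.List.pyRange_neg_one_eq_nil (by omega), PySem.List.enumerate_nil, legsB_nil]
      have hT1 : T (n-3*r) = 1 := by rw [show n-3*r = 1 by omega]; rfl
      show mkTri n (T n - T (n-3*r) + (n-3*r)) = mkTri n (T n)
      rw [show T n - T (n-3*r) + (n-3*r) = T n by omega]
    -- leg at index 3r+1: direction right, n-3r-1 moves
    rw [PySem.List.pyRange_neg_one_cons (by omega), PySem.List.enumerate_cons, legsB_cons',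
        show ((3*r+1) % 3 : Int) = 1 by omega,
        show stepsB 1 = ((0:Int),(1:Int)) from rfl]
    rw [show T n - T (n-3*r) + (n-3*r) = T n - T (n-3*r) + (n-3*r) + (r - r) by ring]
    rw [B_right n r (by omega) (n-3*r-1).toNat r (T n - T (n-3*r) + (n-3*r) + (r - r))
          (by omega) (by push_cast; omega) (by omega),
        show T n - T (n-3*r) + (n-3*r) + (r - r) + (((n-3*r-1).toNat : Nat) : Int)
          = T n - T (n-3*r) + 2*(n-3*r) - 1 + (n-1-r-(n-1-r)) by push_cast; omega,
        show r + (((n-3*r-1).toNat : Nat) : Int) = n-1-2*r by push_cast; omega]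
    by_cases hc2 : sN = 2
    · rw [PySem.List.pyRange_neg_one_eq_nil (by omega), PySem.List.enumerate_nil, legsB_nil]
      have hT2 : T (n-3*r) = 3 := by rw [show n-3*r = 2 by omega]; rfl
      show mkTri n (T n - T (n-3*r) + 2*(n-3*r) - 1 + (n-1-r-(n-1-r))) = mkTri n (T n)
      rw [show T n - T (n-3*r) + 2*(n-3*r) - 1 + (n-1-r-(n-1-r)) = T n by omega]
    -- leg at index 3r+2: direction up-left, n-3r-2 moves
    rw [PySem.List.pyRange_neg_one_cons (by omega), PySem.List.enumerate_cons, legsB_cons',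
        show ((3*r+1+1) % 3 : Int) = 2 by omega,
        show stepsB 2 = ((-1:Int),(-1:Int)) from rfl,
        B_up n r (by omega) (n-3*r-1-1).toNat (n-1-r) (n-1-2*r)
          (T n - T (n-3*r) + 2*(n-3*r) - 1 + (n-1-r-(n-1-r)))
          (by omega) (by push_cast; omega) (by omega) (by omega),
        show T n - T (n-3*r) + 2*(n-3*r) - 1 + (n-1-r-(n-1-r)) + (((n-3*r-1-1).toNat : Nat) : Int)
          = T n - T (n-3*r) + (3*(n-3*r) - 3) by push_cast; omega,
        show (n-1-r) - (((n-3*r-1-1).toNat : Nat) : Int) = 2*r+1 by push_cast; omega,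
        show (n-1-2*r) - (((n-3*r-1-1).toNat : Nat) : Int) = r+1 by push_cast; omega]
    by_cases hc3 : sN = 3
    · rw [PySem.List.pyRange_neg_one_eq_nil (by omega), PySem.List.enumerate_nil, legsB_nil]
      have hT3 : T (n-3*r) = 6 := by rw [show n-3*r = 3 by omega]; rfl
      show mkTri n (T n - T (n-3*r) + (3*(n-3*r) - 3)) = mkTri n (T n)
      rw [show T n - T (n-3*r) + (3*(n-3*r) - 3) = T n by omega]
    -- recurse into ring r+1
    have hdel := T_delta (s := n-3*r) (by omega)
    have hshift : T (n-3*(r+1)) = T (n-3*r-3) := by rw [show n-3*(r+1) = n-3*r-3 by ring]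
    rw [show (n-3*r-1-1-1 : Int) = n-3*(r+1) by ring,
        show (3*r+1+1+1 : Int) = 3*(r+1) by ring,
        show T n - T (n-3*r) + (3*(n-3*r) - 3) = T n - T (n-3*(r+1)) by omega,
        show (2*r+1 : Int) = 2*(r+1)-1 by ring]
    exact ih (sN-3) (by omega) (r+1) (by omega) (by push_cast; omega) (by omega)


theorem solutionB_eq (n : Int) (hn : 4 ≤ n) :
    solution_alt n = (mkTri n (T n)).flatten := by
  have hT0 : T (n - 3*0) = T n := by rw [show n-3*(0:Int) = n by ring]
  have hdel := T_delta (s := n) (by omega)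
  have hT31 : T (n - 3*1) = T (n-3) := by rw [show n-3*(1:Int) = n-3 by ring]
  simp only [solution_alt]
  rw [init_mkTri_B (by omega),
      show ([n-1] ++ PySem.List.pyRange (n-1) 0 (-1)) = (n-1) :: PySem.List.pyRange (n-1) 0 (-1)
        from rfl,
      PySem.List.enumerate_cons, legsB_cons',
      show ((0:Int) % 3) = 0 by decide,
      show stepsB 0 = ((1:Int),(0:Int)) from rfl,
      show (0:Int)+1 = 1 by norm_num]
  -- head leg: down, n-1 moves from (0,0)
  have h1 := B_down n 0 (le_refl 0) (n-1).toNat 0 1 (by omega) (by push_cast; omega)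
    (by rw [hT0]; omega)
  rw [show ((1:Int)+1) = 2 by norm_num,
      show (1 + (((n-1).toNat : Nat) : Int)) = n by push_cast; omega,
      show ((0:Int) + (((n-1).toNat : Nat) : Int)) = n-1 by push_cast; omega] at h1
  rw [h1]
  -- leg 1: right, n-1 moves
  rw [PySem.List.pyRange_neg_one_cons (by omega : (0:Int) < n-1), PySem.List.enumerate_cons,
      legsB_cons', show ((1:Int) % 3) = 1 by decide,
      show stepsB 1 = ((0:Int),(1:Int)) from rfl]
  have h2 := B_right n 0 (le_refl 0) (n-1).toNat 0 n (le_refl 0) (by push_cast; omega)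
    (by rw [hT0]; omega)
  rw [show (n-1-0 : Int) = n-1 by ring,
      show (n + (((n-1).toNat : Nat) : Int)) = 2*n-1 by push_cast; omega,
      show ((0:Int) + (((n-1).toNat : Nat) : Int)) = n-1 by push_cast; omega] at h2
  rw [h2]
  -- leg 2: up-left, n-2 moves
  rw [PySem.List.pyRange_neg_one_cons (by omega : (0:Int) < n-1-1), PySem.List.enumerate_cons,
      legsB_cons', show ((1:Int)+1) % 3 = 2 by decide,
      show stepsB 2 = ((-1:Int),(-1:Int)) from rfl]
  have h3 := B_up n 0 (le_refl 0) (n-1-1).toNat (n-1) (n-1) (2*n-1) (by omega)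
    (by push_cast; omega) (by omega) (by rw [hT0]; omega)
  rw [show (2*n-1 + (((n-1-1).toNat : Nat) : Int)) = T n - T (n-3*1) by
        rw [hT31]; push_cast; omega,
      show ((n-1 : Int) - (((n-1-1).toNat : Nat) : Int)) = 1 by push_cast; omega] at h3
  rw [h3]
  -- the remaining rings, from ring 1
  have hmain := B_main n (n-3).toNat 1 (le_refl 1) (by push_cast; omega) (by omega)
  rw [show (2*(1:Int)-1) = 1 by norm_num] at hmain
  rw [show (n-1-1-1 : Int) = n-3*1 by ring, show ((1:Int)+1+1) = 3*1 by norm_num, hmain]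
  simp

-- ===== VERDICT (by name: the statement is the Claim_ definition above) =====
theorem solution_spec : Claim_equal_solution := by
  unfold Claim_equal_solution
  intro n _ hpre
  unfold Spec_solution
  unfold Pre_solution at hpre
  rcases Int.lt_or_le n 4 with hsmall | hbig
  · have h123 : n = 1 ∨ n = 2 ∨ n = 3 := by omega
    rcases h123 with h | h | h <;> subst h <;> decide
  · rw [solutionA_eq n (by omega), solutionB_eq n hbig]
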